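-- pv_equiv track=rewrite | github.com/doeun-235/coding_test | 프로그래머스/lv2/17687. ［3차］ n진수 게임/［3차］ n진수 게임.py | narynum
-- ===== SOURCE A (Python) =====
-- def n_digit(n):
--     digit = [str(i) for i in range(min(10,n))]
--     if n > 10 : digit.extend(['A','B','C','D','E','F'][:n-10])
--     return digit
--
-- def next_nary(n_rvs,n):
--     n_rvs[0] += 1
--     for i in range(len(n_rvs)-1):
--         if n_rvs[i] == n :
--             n_rvs[i] = 0
--             n_rvs[i+1] += 1
--         else : break
--     else :
--         if n_rvs[-1]==n :
--             a = len(n_rvs)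
--             n_rvs = [0 for _ in range(a)]
--             n_rvs.append(1)
--     return n_rvs
--
-- def narynum(n,limit):
--     digit = n_digit(n)
--     cur_n_rvs=[0]
--     ret = []
--     for i in range(limit+1):
--         add = [digit[i] for i in cur_n_rvs]
--         ret.extend(add[::-1])
--         cur_n_rvs = next_nary(cur_n_rvs,n)
--     return ret
-- ===== SOURCE B (Python) =====
-- def narynum(n, limit):
--     table = [str(d) for d in range(min(10, n))] + (['A', 'B', 'C', 'D', 'E', 'F'][:n - 10] if n > 10 else [])
--
--     def digits(x):
--         # big-endian base-n digits of x; [] for x == 0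
--         if x <= 0:
--             return []
--         q, r = divmod(x, n)
--         return digits(q) + [r]
--
--     out = []
--     for i in range(limit + 1):
--         out.extend(table[d] for d in (digits(i) or [0]))
--     return out
-- ===== Notes on version B (the rewrite author's own statement) =====
-- stated objective: simpler
-- what changed: B drops A's stateful little-endian counter with carry propagation (next_nary) and instead converts each i independently to base n by recursive divmod, mapping digits through the same table.
import Mathlib
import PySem

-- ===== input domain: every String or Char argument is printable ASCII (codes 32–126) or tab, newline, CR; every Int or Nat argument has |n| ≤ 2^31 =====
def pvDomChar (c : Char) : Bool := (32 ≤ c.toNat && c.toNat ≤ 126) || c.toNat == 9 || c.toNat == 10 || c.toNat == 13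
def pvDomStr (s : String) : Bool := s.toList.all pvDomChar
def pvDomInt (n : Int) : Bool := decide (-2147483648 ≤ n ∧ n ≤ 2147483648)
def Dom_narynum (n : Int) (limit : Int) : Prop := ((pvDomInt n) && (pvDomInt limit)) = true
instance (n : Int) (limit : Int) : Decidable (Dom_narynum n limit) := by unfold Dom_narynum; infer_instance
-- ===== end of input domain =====

-- B replaces A's incremental carry counter (next_nary) by an independent per-number
-- recursive divmod conversion through the same digit table: simpler, same cost.


-- ===== PORT A =====
-- n_digit
def nDigit (n : Int) : List String :=
  let digit := (PySem.List.pyRange 0 (min 10 n) 1).map PySem.Int.toStr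
  if n > 10 then digit ++ PySem.List.slice ["A","B","C","D","E","F"] none (some (n - 10)) else digit

-- the 'for i in range(len(n_rvs)-1)' carry loop of next_nary, as structural recursion
-- over the same list state; the Bool records whether the loop hit 'break'
def nextNaryLoop (n : Int) : List Int → List Int × Bool
  | [] => ([], false)
  | [d] => ([d], false)
  | d :: d' :: rest =>
      if d = n then
        let p := nextNaryLoop n ((d' + 1) :: rest)
        (0 :: p.1, p.2)
      else (d :: d' :: rest, true)
termination_by l => l.length

-- next_nary (n_rvs[0] += 1 is List.modify at index 0; the for-else keeps A's order)
def nextNary (l : List Int) (n : Int) : List Int :=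
  let l1 := l.modify 0 (· + 1)
  let p := nextNaryLoop n l1
  if p.2 then p.1
  else if p.1.getLast? = some n then List.replicate p.1.length 0 ++ [1] else p.1

def narynum (n : Int) (limit : Int) : List String :=
  let digit := nDigit n
  ((PySem.List.pyRange 0 (limit + 1) 1).foldl
    (fun st _i =>
      let add := st.1.map (fun j => (PySem.List.pyGet? digit j).getD "")
      (nextNary st.1 n, st.2 ++ ((PySem.List.slice? add none none (-1)).getD [])))
    ([0], ([] : List String))).2

-- ===== PORT B =====
-- the digit table built once (same expression as in Source B)
def bTable (n : Int) : List String :=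
  (PySem.List.pyRange 0 (min 10 n) 1).map PySem.Int.toStr ++
    (if n > 10 then PySem.List.slice ["A","B","C","D","E","F"] none (some (n - 10)) else [])

-- digits(x): big-endian base-n digits, [] for x ≤ 0; the fuel only bounds the
-- recursion depth (Python's recursion is unbounded); with fuel ≥ x it is exact
def bDigits (n : Int) : Nat → Int → List Int
  | 0, _ => []
  | fuel + 1, x =>
      if x > 0 then bDigits n fuel (PySem.Int.floordiv x n) ++ [PySem.Int.mod x n] else []

def narynum_alt (n : Int) (limit : Int) : List String :=
  let table := bTable n
  (PySem.List.pyRange 0 (limit + 1) 1).foldl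
    (fun out i =>
      let ds := bDigits n i.toNat i
      out ++ (if ds = [] then [0] else ds).map (fun d => (PySem.List.pyGet? table d).getD ""))
    []

-- ===== PRECONDITION & SPEC =====
-- exactly the inputs on which the Python A returns: any limit < 0 (empty range);
-- 2 ≤ n ≤ 16 (every digit fits the table); n = 1 only up to limit 0; n ≥ 17 only up
-- to limit 15 (from 16 on a digit ≥ 16 overruns the table and A raises IndexError)
def Pre_narynum (n : Int) (limit : Int) : Prop :=
  limit < 0 ∨ (2 ≤ n ∧ n ≤ 16) ∨ (n = 1 ∧ limit ≤ 0) ∨ (17 ≤ n ∧ limit ≤ 15)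
instance (n : Int) (limit : Int) : Decidable (Pre_narynum n limit) := by
  unfold Pre_narynum; infer_instance
def pvWitness_narynum : Int × Int := (8, 20)

def Spec_narynum (n : Int) (limit : Int) (out : List String) : Prop := out = narynum_alt n limit
instance (n : Int) (limit : Int) (out : List String) : Decidable (Spec_narynum n limit out) := by
  unfold Spec_narynum; infer_instance

-- ===== CLAIM (what is proved, stated in full; the proofs are below) =====
def Claim_equal_narynum : Prop :=
  ∀ (n : Int) (limit : Int), Dom_narynum n limit → Pre_narynum n limit →
    Spec_narynum n limit (narynum n limit)

-- ===== LEMMAS AND PROOFS =====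

-- little-endian canonical digits of x in base n ([] for x = 0), proof helper
def canonLE (n x : Nat) : List Int :=
  if h : 2 ≤ n ∧ 0 < x then ((x % n : Nat) : Int) :: canonLE n (x / n) else []
termination_by x
decreasing_by exact Nat.div_lt_self h.2 (by omega)

-- the counter value produced by A after x increments (little-endian, [0] at x = 0)
def rep (n x : Nat) : List Int := ((x % n : Nat) : Int) :: canonLE n (x / n)

theorem canonLE_zero (n : Nat) : canonLE n 0 = [] := by
  rw [canonLE]; simp

theorem canonLE_pos (n x : Nat) (hn : 2 ≤ n) (hx : 0 < x) : canonLE n x = rep n x := by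
  rw [canonLE, rep]; simp [hn, hx]

theorem rep_zero (n : Nat) (hn : 2 ≤ n) : rep n 0 = [0] := by
  simp [rep, Nat.zero_div, canonLE_zero, Nat.mod_eq_of_lt (by omega : 0 < n)]

-- abbreviation of next_nary's for-else tail fixup applied to the loop's result
def fixup (n : Int) (p : List Int × Bool) : List Int :=
  if p.2 then p.1 else if p.1.getLast? = some n then List.replicate p.1.length 0 ++ [1] else p.1

-- carry chain + fixup, as one recursive function (proof helper)
def fC (n : Int) : List Int → List Int
  | [] => [1]
  | [d] => if d = n then [0, 1] else [d]
  | d :: d' :: rest => if d = n then 0 :: fC n ((d' + 1) :: rest) else d :: d' :: rest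
termination_by l => l.length

theorem fC_single (n d : Int) : fC n [d] = if d = n then [0, 1] else [d] := by rw [fC.eq_def]
theorem fC_cons (n d d' : Int) (rest : List Int) :
    fC n (d :: d' :: rest) = if d = n then 0 :: fC n ((d' + 1) :: rest) else d :: d' :: rest := by
  rw [fC.eq_def]
theorem loop_single (n d : Int) : nextNaryLoop n [d] = ([d], false) := by rw [nextNaryLoop.eq_def]
theorem loop_cons (n d d' : Int) (rest : List Int) :
    nextNaryLoop n (d :: d' :: rest) =
      if d = n then ((0 :: (nextNaryLoop n ((d' + 1) :: rest)).1), (nextNaryLoop n ((d' + 1) :: rest)).2)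
      else (d :: d' :: rest, true) := by
  rw [nextNaryLoop.eq_def]

theorem nextNaryLoop_length (n : Int) (ds : List Int) :
    ∀ d, (nextNaryLoop n (d :: ds)).1.length = ds.length + 1 := by
  induction ds with
  | nil => intro d; rw [loop_single]; simp
  | cons d' rest ih =>
      intro d
      rw [loop_cons]
      by_cases h : d = n
      · simp only [if_pos h]
        simp [ih (d' + 1)]
      · simp [h]

theorem fixup_cons_zero (n : Int) (q : List Int × Bool) (hq : q.1 ≠ []) :
    fixup n (0 :: q.1, q.2) = 0 :: fixup n q := by
  unfold fixup
  by_cases hb : q.2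
  · simp [hb]
  · cases hl : q.1 with
    | nil => exact absurd hl hq
    | cons a as =>
        simp only [hb, Bool.false_eq_true, if_false, List.getLast?_cons_cons]
        by_cases hlast : (a :: as).getLast? = some n
        · simp [hlast, List.replicate_succ]
        · simp [hlast]

theorem loop_fixup (n : Int) (ds : List Int) :
    ∀ d, fixup n (nextNaryLoop n (d :: ds)) = fC n (d :: ds) := by
  induction ds with
  | nil =>
      intro d
      rw [loop_single, fC_single]
      by_cases h : d = n <;> simp [fixup, h]
  | cons d' rest ih =>
      intro d
      rw [loop_cons, fC_cons]
      by_cases h : d = n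
      · simp only [if_pos h]
        have hnil : (nextNaryLoop n ((d' + 1) :: rest)).1 ≠ [] := by
          have := nextNaryLoop_length n rest (d' + 1)
          intro hc; rw [hc] at this; simp at this
        rw [fixup_cons_zero n _ hnil, ih (d' + 1)]
      · simp [fixup, h]

theorem nextNary_eq_fC (n : Int) (d : Int) (ds : List Int) :
    nextNary (d :: ds) n = fC n ((d + 1) :: ds) := by
  unfold nextNary
  have hmod : (d :: ds).modify 0 (· + 1) = (d + 1) :: ds := by
    simp [List.modify]
  rw [hmod]
  exact loop_fixup n ds (d + 1)

-- the carry step computes the canonical increment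
theorem fC_rep (n : Nat) (hn : 2 ≤ n) :
    ∀ x : Nat, fC (n : Int) ((((x % n : Nat) : Int) + 1) :: canonLE n (x / n)) = rep n (x + 1) := by
  intro x
  induction x using Nat.strong_induction_on with
  | _ x ih =>
    have hn0 : 0 < n := by omega
    have hmodlt : x % n < n := Nat.mod_lt x hn0
    by_cases hcarry : x % n + 1 = n
    · -- carry out of the lowest digit
      have hx0 : 0 < x := by
        rcases Nat.eq_zero_or_pos x with h0 | h0
        · subst h0; simp at hcarry; omega
        · exact h0
      have hhead : (((x % n : Nat) : Int) + 1) = (n : Int) := by exact_mod_cast congrArg (Nat.cast (R := Int)) hcarry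
      by_cases hq : x / n = 0
      · -- single digit: x = n - 1
        have hx : x = n - 1 := by
          have := Nat.div_add_mod x n; rw [hq] at this; omega
        rw [hq, canonLE_zero]
        rw [hhead, fC_single, if_pos rfl]
        have hx1 : x + 1 = n := by omega
        rw [hx1, rep]
        simp [Nat.mod_self, Nat.div_self hn0, canonLE_pos n 1 hn (by omega), rep,
          Nat.mod_eq_of_lt (by omega : 1 < n), Nat.div_eq_of_lt (by omega : 1 < n), canonLE_zero]
      · -- recurse into the higher digits
        have hqpos : 0 < x / n := Nat.pos_of_ne_zero hq
        rw [canonLE_pos n (x / n) hn hqpos, rep]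
        rw [hhead, fC_cons, if_pos rfl]
        have hqlt : x / n < x := Nat.div_lt_self hx0 (by omega)
        rw [ih (x / n) hqlt]
        have hsum : x + 1 = n * (x / n + 1) := by
          have h1 := Nat.div_add_mod x n
          have h2 : n * (x / n + 1) = n * (x / n) + n := by ring
          omega
        have hmod : (x + 1) % n = 0 := by rw [hsum]; exact Nat.mul_mod_right n _
        have hdiv : (x + 1) / n = x / n + 1 := by
          rw [hsum]; exact Nat.mul_div_cancel_left _ hn0
        simp only [rep, hmod, hdiv]
        rw [canonLE_pos n (x / n + 1) hn (by omega)]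
        simp [rep]
    · -- no carry
      have hlt : x % n + 1 < n := by omega
      have hhead : (((x % n : Nat) : Int) + 1) ≠ (n : Int) := by
        intro hc
        have : x % n + 1 = n := by exact_mod_cast hc
        exact hcarry this
      have hmod : (x + 1) % n = x % n + 1 ∧ (x + 1) / n = x / n := by
        have huniq := (Nat.div_mod_unique (b := n) (a := x + 1) (d := x / n) (c := x % n + 1) hn0).mpr
          ⟨by have := Nat.div_add_mod x n; omega, hlt⟩
        exact ⟨huniq.2, huniq.1⟩
      have hres : rep n (x + 1) = (((x % n : Nat) : Int) + 1) :: canonLE n (x / n) := by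
        rw [rep, hmod.1, hmod.2]; simp
      rw [hres]
      cases hLE : canonLE n (x / n) with
      | nil => rw [fC_single, if_neg hhead]
      | cons a as => rw [fC_cons, if_neg hhead]

theorem nextNary_rep (n : Nat) (hn : 2 ≤ n) (x : Nat) :
    nextNary (rep n x) (n : Int) = rep n (x + 1) := by
  rw [rep, nextNary_eq_fC]
  exact fC_rep n hn x

-- B's recursive digits equal the reversed canonical little-endian digits
theorem bDigits_canon (n : Nat) (hn : 2 ≤ n) :
    ∀ fuel x : Nat, x ≤ fuel → bDigits (n : Int) fuel (x : Int) = (canonLE n x).reverse := by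
  intro fuel
  induction fuel with
  | zero =>
      intro x hx
      have : x = 0 := by omega
      subst this
      simp [bDigits, canonLE_zero]
  | succ fuel ih =>
      intro x hx
      by_cases hx0 : 0 < x
      · have hpos : (0 : Int) < (x : Int) := by exact_mod_cast hx0
        rw [bDigits.eq_def]
        simp only [if_pos hpos]
        rw [PySem.Int.floordiv_natCast, PySem.Int.mod_natCast]
        have hqfuel : x / n ≤ fuel := by
          have := Nat.div_lt_self hx0 (by omega : 1 < n); omega
        rw [ih (x / n) hqfuel]
        rw [canonLE_pos n x hn hx0, rep]
        simp
      · have : x = 0 := by omega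
        subst this
        simp [bDigits, canonLE_zero]
  
-- the tables of the two ports are the same list
theorem table_eq (n : Int) : nDigit n = bTable n := by
  unfold nDigit bTable
  by_cases h : n > 10 <;> simp [h]

-- one output chunk agrees: reversing after mapping = mapping after reversing
theorem chunk_eq (n : Nat) (hn : 2 ≤ n) (g : Int → String) (x : Nat) :
    ((rep n x).map g).reverse =
      (if (canonLE n x).reverse = [] then [0] else (canonLE n x).reverse).map g := by
  by_cases hx : 0 < x
  · rw [canonLE_pos n x hn hx]
    have : (rep n x).reverse ≠ [] := by simp [rep]
    simp [rep, List.map_reverse]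
  · have : x = 0 := by omega
    subst this
    rw [rep_zero n hn, canonLE_zero]
    simp

-- the main fold invariant: after the prefix [0, …, k-1], A's state is (rep n k, out)
-- with out equal to B's fold result over the same prefix
theorem fold_invariant (n : Nat) (hn : 2 ≤ n) (k : Nat) :
    (PySem.List.pyRange 0 (k : Int) 1).foldl
      (fun st _i =>
        let add := st.1.map (fun j => (PySem.List.pyGet? (nDigit (n : Int)) j).getD "")
        (nextNary st.1 (n : Int), st.2 ++ ((PySem.List.slice? add none none (-1)).getD [])))
      ([0], ([] : List String)) =
    (rep n k,
      (PySem.List.pyRange 0 (k : Int) 1).foldl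
        (fun out i =>
          let ds := bDigits (n : Int) i.toNat i
          out ++ (if ds = [] then [0] else ds).map
            (fun d => (PySem.List.pyGet? (bTable (n : Int)) d).getD ""))
        []) := by
  induction k with
  | zero =>
      rw [PySem.List.pyRange_zero_nat]
      simp [rep_zero n hn]
  | succ k ih =>
      have hsplit : PySem.List.pyRange 0 ((k + 1 : Nat) : Int) 1 =
          PySem.List.pyRange 0 (k : Int) 1 ++ [(k : Int)] := by
        have : ((k + 1 : Nat) : Int) = (k : Int) + 1 := by push_cast; ring
        rw [this]
        exact PySem.List.pyRange_one_succ_right (by exact_mod_cast Nat.zero_le k)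
      rw [hsplit, List.foldl_append, List.foldl_append, ih]
      simp only [List.foldl_cons, List.foldl_nil]
      refine Prod.ext ?_ ?_
      · exact nextNary_rep n hn k
      · simp only [table_eq, PySem.List.slice?_none_none_neg_one, Option.getD_some]
        rw [Int.toNat_natCast, bDigits_canon n hn k k (le_refl k)]
        rw [← chunk_eq n hn (fun d => (PySem.List.pyGet? (bTable (n : Int)) d).getD "") k]

-- A = B for every base n ≥ 2, any limit
theorem main_eq (n limit : Int) (hn : 2 ≤ n) : narynum n limit = narynum_alt n limit := by
  unfold narynum narynum_alt
  dsimp only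
  by_cases hneg : limit + 1 ≤ 0
  · rw [PySem.List.pyRange_one_eq_nil hneg]; simp
  · have hk : limit + 1 = ((limit + 1).toNat : Int) := by omega
    have hnn : n = ((n.toNat : Nat) : Int) := by omega
    have hn2 : 2 ≤ n.toNat := by omega
    rw [hk, hnn]
    rw [fold_invariant n.toNat hn2 (limit + 1).toNat]

-- ===== VERDICT (by name: the statement is the Claim_ definition above) =====
theorem narynum_spec : Claim_equal_narynum := by
  intro n limit _hdom hpre
  unfold Spec_narynum
  rcases hpre with hneg | ⟨h2, _⟩ | ⟨h1, h0⟩ | ⟨h17, _⟩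
  · -- limit < 0: empty range on both sides
    unfold narynum narynum_alt
    rw [PySem.List.pyRange_one_eq_nil (by omega)]
    simp
  · exact main_eq n limit h2
  · -- n = 1: only limit ≤ 0 is accepted; limit = 0 is a single literal evaluation
    subst h1
    rcases lt_or_eq_of_le h0 with hlt | heq
    · unfold narynum narynum_alt
      rw [PySem.List.pyRange_one_eq_nil (by omega)]
      simp
    · subst heq; decide
  · exact main_eq n limit (by omega)
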